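-- pv_equiv track=rewrite | github.com/Bailejd/Advent-of-Code | 2020/09/9.py | part_two
-- ===== SOURCE A (Python) =====
-- def part_two(data_list, first_invalid):
--     contiguous_nums = []
--     for i in range(len(data_list)):
--         for j in range(len(data_list)):
--             if(i >= j):
--                 continue
--             else:
--                 contiguous_nums = data_list[i:j]
--                 if(sum(contiguous_nums) == first_invalid):
--                     return (min(contiguous_nums) + max(contiguous_nums))
-- ===== SOURCE B (Python) =====
-- def part_two(data_list, first_invalid):
--     # A's slice end j stops at len(data_list)-1, so its candidate windows are
--     # exactly the contiguous windows of data_list[:-1], scanned by start then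
--     # length.  Scan those windows with one running sum/min/max pass per start
--     # position instead of re-materialising and re-summing every slice.
--     suffix = data_list[:-1]
--     while suffix:
--         total = 0
--         lo = hi = suffix[0]
--         for x in suffix:
--             total += x
--             if x < lo:
--                 lo = x
--             if x > hi:
--                 hi = x
--             if total == first_invalid:
--                 return lo + hi
--         suffix = suffix[1:]
--     return None
-- ===== Notes on version B (the rewrite author's own statement) =====
-- stated objective: faster
-- what changed: Replaces A's triple-nested slice-and-resum scan (every (i,j) pair re-materialises data_list[i:j] and recomputes sum, min and max from scratch) by one running sum/min/max pass per start position over the windows of data_list[:-1], which are exactly A's candidate windows.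
import Mathlib
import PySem

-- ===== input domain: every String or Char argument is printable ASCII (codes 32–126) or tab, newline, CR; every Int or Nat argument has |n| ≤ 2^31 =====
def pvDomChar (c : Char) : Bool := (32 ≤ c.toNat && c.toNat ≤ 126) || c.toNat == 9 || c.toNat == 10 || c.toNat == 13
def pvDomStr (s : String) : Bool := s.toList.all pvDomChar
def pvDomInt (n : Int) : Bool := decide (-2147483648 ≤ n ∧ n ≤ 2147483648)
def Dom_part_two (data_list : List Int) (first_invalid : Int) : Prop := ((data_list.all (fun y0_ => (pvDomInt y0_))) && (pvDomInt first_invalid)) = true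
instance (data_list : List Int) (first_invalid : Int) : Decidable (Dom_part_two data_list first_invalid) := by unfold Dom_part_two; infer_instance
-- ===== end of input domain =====

-- B replaces A's cubic slice-and-resum scan by one pass of running sum/min/max per
-- start position (quadratic, stops at the first hit) over data_list[:-1], whose
-- contiguous windows are exactly A's candidate windows.

-- ===== PORT A =====
-- inner 'for j in range(len(data_list))' loop; the '| _, _ => none' arm is where
-- Python's min()/max() would raise on an empty slice — unreachable since i < j.
def ptA_inner (data_list : List Int) (first_invalid : Int) (i : Int) : List Int → Option Int
  | [] => none
  | j :: js =>
    if i ≥ j then ptA_inner data_list first_invalid i js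
    else
      let contiguous_nums := PySem.List.slice data_list (some i) (some j)
      if contiguous_nums.sum = first_invalid then
        match PySem.List.min? contiguous_nums (fun y => y), PySem.List.max? contiguous_nums (fun y => y) with
        | some lo, some hi => some (lo + hi)
        | _, _ => none
      else ptA_inner data_list first_invalid i js

-- outer 'for i in range(len(data_list))' loop
def ptA_outer (data_list : List Int) (first_invalid : Int) : List Int → Option Int
  | [] => none
  | i :: is =>
    match ptA_inner data_list first_invalid i (PySem.List.pyRange 0 (data_list.length : Int) 1) with
    | some v => some v
    | none => ptA_outer data_list first_invalid is

def part_two (data_list : List Int) (first_invalid : Int) : Option Int :=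
  ptA_outer data_list first_invalid (PySem.List.pyRange 0 (data_list.length : Int) 1)

-- ===== PORT B =====
-- inner 'for x in suffix' loop with running total / lo / hi
def ptB_inner (first_invalid : Int) : Int → Int → Int → List Int → Option Int
  | _, _, _, [] => none
  | total, lo, hi, x :: xs =>
    let total := total + x
    let lo := if x < lo then x else lo
    let hi := if x > hi then x else hi
    if total = first_invalid then some (lo + hi) else ptB_inner first_invalid total lo hi xs

-- outer 'while suffix' loop; 'suffix = suffix[1:]'
def ptB_outer (first_invalid : Int) : List Int → Option Int
  | [] => none
  | x :: xs =>
    match ptB_inner first_invalid 0 x x (x :: xs) with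
    | some v => some v
    | none => ptB_outer first_invalid xs

-- 'suffix = data_list[:-1]'
def part_two_alt (data_list : List Int) (first_invalid : Int) : Option Int :=
  ptB_outer first_invalid (PySem.List.slice data_list none (some (-1)))

-- ===== PRECONDITION & SPEC =====
def Spec_part_two (data_list : List Int) (first_invalid : Int) (out : Option Int) : Prop :=
  out = part_two_alt data_list first_invalid

instance (data_list : List Int) (first_invalid : Int) (out : Option Int) : Decidable (Spec_part_two data_list first_invalid out) := by
  unfold Spec_part_two; infer_instance

-- ===== CLAIM (what is proved, stated in full; the proofs are below) =====
def Claim_equal_part_two : Prop := ∀ (data_list : List Int) (first_invalid : Int), Dom_part_two data_list first_invalid → Spec_part_two data_list first_invalid (part_two data_list first_invalid)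

-- ===== LEMMAS AND PROOFS =====

-- the window check both searches perform: prefix of length k of the suffix s
def chkW (t : Int) (s : List Int) (k : Nat) : Option Int :=
  if (s.take k).sum = t then
    match PySem.List.min? (s.take k) (fun y => y), PySem.List.max? (s.take k) (fun y => y) with
    | some lo, some hi => some (lo + hi)
    | _, _ => none
  else none

-- generic first-some chain over indices a, a+1, …, a+r-1
def ochain (g : Nat → Option Int) : Nat → Nat → Option Int
  | _, 0 => none
  | a, r+1 =>
    match g a with
    | some v => some v
    | none => ochain g (a+1) r

-- A's inner loop, abstracted: prefix lengths 1 .. |s|-1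
def gA (dl : List Int) (t : Int) (a : Nat) : Option Int :=
  ochain (chkW t (dl.drop a)) 1 (dl.length - a - 1)

-- B's inner loop, abstracted: prefix lengths 1 .. |s|
def gB (dl : List Int) (t : Int) (a : Nat) : Option Int :=
  ochain (chkW t (dl.drop a)) 1 (dl.length - a)

theorem ochain_snoc (g : Nat → Option Int) (r a : Nat) :
    ochain g a (r+1) = match ochain g a r with
      | some v => some v
      | none => g (a + r) := by
  induction r generalizing a with
  | zero => cases h : g a <;> simp [ochain, h]
  | succ r ih =>
    show (match g a with
          | some v => some v
          | none => ochain g (a+1) (r+1)) = _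
    cases h : g a with
    | some v => simp [ochain, h]
    | none =>
      rw [ih]
      simp [ochain, h, Nat.add_comm, Nat.add_left_comm]

theorem ite_min (y lo : Int) : (if y < lo then y else lo) = min lo y := by
  rw [min_def]; split <;> split <;> omega

theorem ite_max (y hi : Int) : (if y > hi then y else hi) = max hi y := by
  rw [max_def]; split <;> split <;> omega

theorem min?_snoc (done : List Int) (y lo : Int)
    (h : PySem.List.min? done (fun z => z) = some lo) :
    PySem.List.min? (done ++ [y]) (fun z => z) = some (min lo y) := by
  cases done with
  | nil => simp [PySem.List.min?] at h
  | cons d0 d' =>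
    rw [PySem.List.min?_id_cons] at h
    injection h with h
    show PySem.List.min? (d0 :: (d' ++ [y])) (fun z => z) = _
    rw [PySem.List.min?_id_cons, List.foldl_append, h]
    rfl

theorem max?_snoc (done : List Int) (y hi : Int)
    (h : PySem.List.max? done (fun z => z) = some hi) :
    PySem.List.max? (done ++ [y]) (fun z => z) = some (max hi y) := by
  cases done with
  | nil => simp [PySem.List.max?] at h
  | cons d0 d' =>
    rw [PySem.List.max?_id_cons] at h
    injection h with h
    show PySem.List.max? (d0 :: (d' ++ [y])) (fun z => z) = _
    rw [PySem.List.max?_id_cons, List.foldl_append, h]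
    rfl

theorem take_snoc_of_cons (done : List Int) (y : Int) (ys : List Int) :
    (done ++ y :: ys).take (done.length + 1) = done ++ [y] := by
  rw [List.take_append]
  simp

theorem B_run (t : Int) (rest : List Int) : ∀ (done : List Int) (lo hi : Int),
    PySem.List.min? done (fun z => z) = some lo →
    PySem.List.max? done (fun z => z) = some hi →
    ptB_inner t done.sum lo hi rest = ochain (chkW t (done ++ rest)) (done.length + 1) rest.length := by
  induction rest with
  | nil => intro done lo hi _ _; rfl
  | cons y ys ih =>
    intro done lo hi hlo hhi
    have hchk : chkW t (done ++ y :: ys) (done.length + 1)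
        = if done.sum + y = t then some (min lo y + max hi y) else none := by
      unfold chkW
      rw [take_snoc_of_cons, min?_snoc done y lo hlo, max?_snoc done y hi hhi]
      simp
    have hrhs : ochain (chkW t (done ++ y :: ys)) (done.length + 1) (ys.length + 1)
        = match chkW t (done ++ y :: ys) (done.length + 1) with
          | some v => some v
          | none => ochain (chkW t (done ++ y :: ys)) (done.length + 1 + 1) ys.length := rfl
    show (if done.sum + y = t
          then some ((if y < lo then y else lo) + (if y > hi then y else hi))
          else ptB_inner t (done.sum + y) (if y < lo then y else lo) (if y > hi then y else hi) ys) = _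
    rw [ite_min, ite_max, List.length_cons, hrhs, hchk]
    by_cases hc : done.sum + y = t
    · rw [if_pos hc, if_pos hc]
    · rw [if_neg hc, if_neg hc]
      have := ih (done ++ [y]) (min lo y) (max hi y)
        (min?_snoc done y lo hlo) (max?_snoc done y hi hhi)
      simpa [List.append_assoc] using this

theorem B_inner_full (t x : Int) (xs : List Int) :
    ptB_inner t 0 x x (x :: xs) = ochain (chkW t (x :: xs)) 1 (xs.length + 1) := by
  have hchk : chkW t (x :: xs) 1 = if x = t then some (x + x) else none := by
    unfold chkW
    have h1 : (x :: xs).take 1 = [x] := by simp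
    rw [h1, show PySem.List.min? [x] (fun z => z) = some x from by
          rw [show ([x] : List Int) = x :: [] from rfl, PySem.List.min?_id_cons]; rfl,
        show PySem.List.max? [x] (fun z => z) = some x from by
          rw [show ([x] : List Int) = x :: [] from rfl, PySem.List.max?_id_cons]; rfl]
    simp
  have hrhs : ochain (chkW t (x :: xs)) 1 (xs.length + 1)
      = match chkW t (x :: xs) 1 with
        | some v => some v
        | none => ochain (chkW t (x :: xs)) 2 xs.length := rfl
  show (if 0 + x = t
        then some ((if x < x then x else x) + (if x > x then x else x))
        else ptB_inner t (0 + x) (if x < x then x else x) (if x > x then x else x) xs) = _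
  rw [hrhs, hchk]
  simp only [lt_irrefl, if_false, zero_add]
  by_cases hc : x = t
  · rw [if_pos hc, if_pos hc]
  · rw [if_neg hc, if_neg hc]
    have := B_run t xs [x] x x
      (by rw [show ([x] : List Int) = x :: [] from rfl, PySem.List.min?_id_cons]; rfl)
      (by rw [show ([x] : List Int) = x :: [] from rfl, PySem.List.max?_id_cons]; rfl)
    simpa using this

theorem A_skip (dl : List Int) (t : Int) (a : Nat) (js : List Int) :
    ∀ (pre : List Int), (∀ j ∈ pre, j ≤ (a : Int)) →
    ptA_inner dl t (a : Int) (pre ++ js) = ptA_inner dl t (a : Int) js := by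
  intro pre
  induction pre with
  | nil => intro _; rfl
  | cons j pre' ih =>
    intro h
    have hj : (a : Int) ≥ j := h j (by simp)
    show ptA_inner dl t (a : Int) (j :: (pre' ++ js)) = _
    conv_lhs => rw [ptA_inner]
    rw [if_pos hj]
    exact ih (fun j' hj' => h j' (by simp [hj']))

theorem A_run (dl : List Int) (t : Int) (a : Nat) (ha : a < dl.length) :
    ∀ (r base : Nat), a < base →
    ptA_inner dl t (a : Int) (PySem.List.pyRange (base : Int) ((base + r : Nat) : Int) 1)
      = ochain (chkW t (dl.drop a)) (base - a) r := by
  intro r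
  induction r with
  | zero =>
    intro base _
    rw [PySem.List.pyRange_one_eq_nil (by push_cast; omega)]
    rfl
  | succ r ih =>
    intro base hab
    rw [PySem.List.pyRange_one_cons (a := (base : Int)) (by push_cast; omega)]
    have hcast : ((base : Int) + 1) = ((base + 1 : Nat) : Int) := by push_cast; ring
    have hcast2 : ((base + (r + 1) : Nat) : Int) = (((base + 1) + r : Nat) : Int) := by push_cast; ring
    have hslice : PySem.List.slice dl (some (a : Int)) (some (base : Int))
        = (dl.drop a).take (base - a) := PySem.List.slice_natCast dl a base
    have hne : (dl.drop a).take (base - a) ≠ [] := by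
      have h1 : dl.drop a ≠ [] := by
        intro h; rw [List.drop_eq_nil_iff] at h; omega
      cases h : dl.drop a with
      | nil => exact absurd h h1
      | cons z zs =>
        have h2 : base - a = (base - a - 1) + 1 := by omega
        rw [h2]; simp
    have hrw : ochain (chkW t (dl.drop a)) (base - a) (r + 1)
        = match chkW t (dl.drop a) (base - a) with
          | some v => some v
          | none => ochain (chkW t (dl.drop a)) (base - a + 1) r := rfl
    show (if (a : Int) ≥ (base : Int) then _ else _) = _
    rw [if_neg (by omega)]
    simp only
    rw [hslice, hrw]
    unfold chkW
    by_cases hc : ((dl.drop a).take (base - a)).sum = t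
    · rw [if_pos hc, if_pos hc]
      cases hmin : PySem.List.min? ((dl.drop a).take (base - a)) (fun y => y) with
      | none => exact absurd ((PySem.List.min?_eq_none_iff _ _).mp hmin) hne
      | some lo =>
        cases hmax : PySem.List.max? ((dl.drop a).take (base - a)) (fun y => y) with
        | none => exact absurd ((PySem.List.max?_eq_none_iff _ _).mp hmax) hne
        | some hi => rfl
    · rw [if_neg hc, if_neg hc]
      rw [hcast, hcast2]
      rw [ih (base + 1) (by omega)]
      congr 1
      omega

theorem A_inner_full (dl : List Int) (t : Int) (a : Nat) (ha : a < dl.length) :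
    ptA_inner dl t (a : Int) (PySem.List.pyRange 0 (dl.length : Int) 1) = gA dl t a := by
  have hsplit : PySem.List.pyRange 0 (dl.length : Int) 1
      = PySem.List.pyRange 0 ((a + 1 : Nat) : Int) 1 ++ PySem.List.pyRange ((a + 1 : Nat) : Int) (dl.length : Int) 1 :=
    PySem.List.pyRange_one_append 0 ((a + 1 : Nat) : Int) (dl.length : Int)
      (by push_cast; omega) (by push_cast; omega)
  rw [hsplit, A_skip dl t a _ _ (fun j hj => by
      have := (PySem.List.mem_pyRange_one).mp hj
      push_cast at this; omega)]
  have hlen : (dl.length : Int) = ((a + 1 + (dl.length - a - 1) : Nat) : Int) := by push_cast; omega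
  rw [hlen, A_run dl t a ha (dl.length - a - 1) (a + 1) (by omega)]
  unfold gA
  congr 1
  omega

theorem A_outer_run (dl : List Int) (t : Int) : ∀ (r base : Nat), base + r = dl.length →
    ptA_outer dl t (PySem.List.pyRange (base : Int) (dl.length : Int) 1) = ochain (gA dl t) base r := by
  intro r
  induction r with
  | zero =>
    intro base hb
    rw [PySem.List.pyRange_one_eq_nil (by omega)]
    rfl
  | succ r ih =>
    intro base hb
    rw [PySem.List.pyRange_one_cons (a := (base : Int)) (by omega)]
    show (match ptA_inner dl t (base : Int) (PySem.List.pyRange 0 (dl.length : Int) 1) with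
          | some v => some v
          | none => ptA_outer dl t (PySem.List.pyRange ((base : Int) + 1) (dl.length : Int) 1)) = _
    rw [A_inner_full dl t base (by omega)]
    have hcast : ((base : Int) + 1) = ((base + 1 : Nat) : Int) := by push_cast; ring
    rw [hcast, ih (base + 1) (by omega)]
    rfl

theorem B_outer_run (dl : List Int) (t : Int) : ∀ (r base : Nat), base + r = dl.length →
    ptB_outer t (dl.drop base) = ochain (gB dl t) base r := by
  intro r
  induction r with
  | zero =>
    intro base hb
    rw [List.drop_eq_nil_iff.mpr (by omega)]
    rfl
  | succ r ih =>
    intro base hb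
    have hblt : base < dl.length := by omega
    rw [List.drop_eq_getElem_cons hblt]
    show (match ptB_inner t 0 dl[base] dl[base] (dl[base] :: dl.drop (base + 1)) with
          | some v => some v
          | none => ptB_outer t (dl.drop (base + 1))) = _
    rw [B_inner_full t dl[base] (dl.drop (base + 1))]
    have hgb : ochain (chkW t (dl[base] :: dl.drop (base + 1))) 1 ((dl.drop (base + 1)).length + 1)
        = gB dl t base := by
      unfold gB
      rw [← List.drop_eq_getElem_cons hblt]
      congr 1
      rw [List.length_drop]
      omega
    rw [hgb, ih (base + 1) (by omega)]
    rfl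

theorem ochain_congr (g g' : Nat → Option Int) : ∀ (r a : Nat),
    (∀ q < r, g (a + q) = g' (a + q)) → ochain g a r = ochain g' a r := by
  intro r
  induction r with
  | zero => intro a _; rfl
  | succ r ih =>
    intro a h
    show (match g a with
          | some v => some v
          | none => ochain g (a + 1) r)
        = (match g' a with
          | some v => some v
          | none => ochain g' (a + 1) r)
    rw [show g a = g' a from by simpa using h 0 (by omega)]
    cases g' a with
    | some v => rfl
    | none =>
      exact ih (a + 1) (fun q hq => by
        have := h (q + 1) (by omega)
        rwa [show a + 1 + q = a + (q + 1) from by omega])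

theorem chkW_congr_take (t : Int) (l l' : List Int) (k : Nat) (h : l.take k = l'.take k) :
    chkW t l k = chkW t l' k := by
  unfold chkW
  rw [h]

-- A's extra start position (the last index) contributes an empty inner scan
theorem ochain_succ_last_none (g : Nat → Option Int) (r : Nat) (h : g r = none) :
    ochain g 0 (r + 1) = ochain g 0 r := by
  rw [ochain_snoc]
  cases hx : ochain g 0 r with
  | some v => rfl
  | none => simpa using h

theorem gA_eq_gB_dropLast (dl : List Int) (t : Int) (a : Nat) :
    gA dl t a = gB (dl.take (dl.length - 1)) t a := by
  unfold gA gB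
  have hlen : (dl.take (dl.length - 1)).length = dl.length - 1 := by
    rw [List.length_take]; omega
  rw [hlen, show dl.length - 1 - a = dl.length - a - 1 from by omega]
  refine ochain_congr _ _ (dl.length - a - 1) 1 (fun q hq => ?_)
  refine chkW_congr_take t _ _ (1 + q) ?_
  rw [List.drop_take, List.take_take, Nat.min_eq_left (by omega)]

theorem chain_A_eq_chain_B (dl : List Int) (t : Int) :
    ochain (gA dl t) 0 dl.length = ochain (gB (dl.take (dl.length - 1)) t) 0 (dl.length - 1) := by
  cases hn : dl.length with
  | zero => rfl
  | succ m =>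
    rw [ochain_succ_last_none (gA dl t) m (by
      unfold gA
      rw [hn, show m + 1 - m - 1 = 0 from by omega]
      rfl)]
    rw [show m + 1 - 1 = m from by omega]
    refine ochain_congr _ _ m 0 (fun q hq => ?_)
    have h2 := gA_eq_gB_dropLast dl t q
    rw [hn] at h2
    simpa using h2

-- ===== VERDICT (by name: the statement is the Claim_ definition above) =====
theorem part_two_spec : Claim_equal_part_two := by
  intro dl t _
  unfold Spec_part_two
  show part_two dl t = part_two_alt dl t
  unfold part_two part_two_alt
  rw [PySem.List.slice_to_neg_one, List.dropLast_eq_take]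
  have hA : ptA_outer dl t (PySem.List.pyRange 0 (dl.length : Int) 1) = ochain (gA dl t) 0 dl.length := by
    have := A_outer_run dl t dl.length 0 (by omega)
    simpa using this
  have hlen : (dl.take (dl.length - 1)).length = dl.length - 1 := by
    rw [List.length_take]; omega
  have hB : ptB_outer t (dl.take (dl.length - 1)) = ochain (gB (dl.take (dl.length - 1)) t) 0 (dl.length - 1) := by
    have := B_outer_run (dl.take (dl.length - 1)) t (dl.length - 1) 0 (by rw [hlen]; omega)
    simpa using this
  rw [hA, hB]
  exact chain_A_eq_chain_B dl t
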